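-- pv_equiv track=rewrite | github.com/Happy-ryan/PS | 백준/Bronze/11091. 알파벳 전부 쓰기/알파벳 전부 쓰기.py | f
-- ===== SOURCE A (Python) =====
-- def f(s: str):
--     check = [0] *26
--     for x in s:
--         if 'a' <= x <= 'z' or 'A' <= x <= 'Z':
--             x = x.upper()
--             x = ord(x) - 65
--             if check[x] == 0:
--                 check[x] = 1
--     return check
-- ===== SOURCE B (Python) =====
-- def f(s: str):
--     # For each of the 26 alphabet positions, query the original string directly:
--     # 26 membership tests (upper- or lowercase form) instead of a scan-and-mark pass.
--     return [1 if chr(65 + i) in s or chr(97 + i) in s else 0 for i in range(26)]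
-- ===== Notes on version B (the rewrite author's own statement) =====
-- stated objective: faster
-- what changed: B keeps no marker state at all: it builds the answer directly by looping over the 26 alphabet positions and testing, per position, whether the upper- or lowercase form of that letter occurs in s via a string membership test (26 such queries on the untouched string), instead of A's per-character Python scan mutating a 26-slot flag list.
import Mathlib
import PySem

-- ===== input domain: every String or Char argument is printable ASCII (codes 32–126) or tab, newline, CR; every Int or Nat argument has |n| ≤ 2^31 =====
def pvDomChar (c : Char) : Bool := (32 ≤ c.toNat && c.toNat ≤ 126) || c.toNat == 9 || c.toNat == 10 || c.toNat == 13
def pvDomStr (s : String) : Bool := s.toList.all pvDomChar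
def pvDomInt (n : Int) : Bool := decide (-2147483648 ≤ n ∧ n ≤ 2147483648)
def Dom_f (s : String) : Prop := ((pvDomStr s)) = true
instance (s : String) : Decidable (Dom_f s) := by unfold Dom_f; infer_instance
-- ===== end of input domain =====

-- B keeps no marker state: it builds the answer by looping over the 26 alphabet
-- positions and testing, per position, whether that letter (upper- or lowercase)
-- occurs as a character of s, instead of A's scan mutating a 26-slot flag list.

-- ===== PORT A =====
-- one iteration of A's for-loop; the index is always in 0..25 under the guard, so
-- check[x] read/write are ported with pyGetD/pySetD (exact in range)
def fStep (check : List Int) (x : Char) : List Int :=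
  if ('a' ≤ x ∧ x ≤ 'z') ∨ ('A' ≤ x ∧ x ≤ 'Z') then
    let i : Int := ((PySem.Chars.upperChar x).toNat : Int) - 65
    if PySem.List.pyGetD check i 0 == 0 then PySem.List.pySetD check i 1 else check
  else check

def f (s : String) : List Int := s.toList.foldl fStep (List.replicate 26 0)

-- ===== PORT B =====
-- 'chr(65+i) in s' is single-character membership in the string: exact as contains on toList
def f_alt (s : String) : List Int :=
  (List.range 26).map (fun i =>
    if s.toList.contains (Char.ofNat (65 + i)) || s.toList.contains (Char.ofNat (97 + i))
    then (1 : Int) else 0)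

-- ===== PRECONDITION & SPEC =====
def Spec_f (s : String) (out : List Int) : Prop := out = f_alt s
instance (s : String) (out : List Int) : Decidable (Spec_f s out) := by unfold Spec_f; infer_instance

-- ===== CLAIM (what is proved, stated in full; the proofs are below) =====
def Claim_equal_f : Prop := ∀ (s : String), Dom_f s → Spec_f s (f s)

-- ===== LEMMAS AND PROOFS =====

-- indicator list of the characters cs, in B's shape
def indOf (cs : List Char) : List Int :=
  (List.range 26).map (fun i =>
    if cs.contains (Char.ofNat (65 + i)) || cs.contains (Char.ofNat (97 + i))
    then (1 : Int) else 0)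

lemma length_indOf (cs : List Char) : (indOf cs).length = 26 := by simp [indOf]

lemma getElem_indOf (cs : List Char) (i : Nat) (h : i < 26) :
    (indOf cs)[i]'(by simp [indOf]; omega) =
      if cs.contains (Char.ofNat (65 + i)) || cs.contains (Char.ofNat (97 + i))
      then (1 : Int) else 0 := by
  simp [indOf]

lemma char_le_toNat {c d : Char} : c ≤ d ↔ c.toNat ≤ d.toNat := by
  rw [Char.le_def, UInt32.le_iff_toNat_le]; rfl

lemma toNat_ofNat_valid (n : Nat) (h : n < 55296) : (Char.ofNat n).toNat = n := by
  rw [Char.toNat_ofNat, if_pos (Or.inl h)]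

lemma char_eq_iff_toNat {c d : Char} : c = d ↔ c.toNat = d.toNat := by
  constructor
  · intro h; rw [h]
  · intro h
    have := congrArg Char.ofNat h
    rwa [Char.ofNat_toNat, Char.ofNat_toNat] at this

lemma guard_iff (c : Char) :
    (('a' ≤ c ∧ c ≤ 'z') ∨ ('A' ≤ c ∧ c ≤ 'Z')) ↔
      (97 ≤ c.toNat ∧ c.toNat ≤ 122) ∨ (65 ≤ c.toNat ∧ c.toNat ≤ 90) := by
  have ea : ('a').toNat = 97 := by decide
  have ez : ('z').toNat = 122 := by decide
  have eA : ('A').toNat = 65 := by decide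
  have eZ : ('Z').toNat = 90 := by decide
  rw [char_le_toNat, char_le_toNat, char_le_toNat, char_le_toNat, ea, ez, eA, eZ]

-- under the guard, upperChar c is the uppercase letter at c's alphabet position
lemma upperChar_toNat (c : Char)
    (h : (97 ≤ c.toNat ∧ c.toNat ≤ 122) ∨ (65 ≤ c.toNat ∧ c.toNat ≤ 90)) :
    (PySem.Chars.upperChar c).toNat =
      if 97 ≤ c.toNat then c.toNat - 32 else c.toNat := by
  have ea : ('a').toNat = 97 := by decide
  have ez : ('z').toNat = 122 := by decide
  simp only [PySem.Chars.upperChar, PySem.Chars.islower]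
  rcases h with ⟨h1, h2⟩ | ⟨h1, h2⟩
  · have hlo : 'a' ≤ c := char_le_toNat.mpr (by omega)
    have hhi : c ≤ 'z' := char_le_toNat.mpr (by omega)
    rw [if_pos (by simp [hlo, hhi])]
    rw [toNat_ofNat_valid _ (by omega), if_pos h1]
  · have hne : ¬ ('a' ≤ c ∧ c ≤ 'z') := by
      intro ⟨ha, _⟩
      have := char_le_toNat.mp ha
      omega
    rw [if_neg (by simpa using hne), if_neg (by omega)]

lemma beq_char_false {a b : Char} (h : a.toNat ≠ b.toNat) : (a == b) = false := by
  rw [beq_eq_false_iff_ne]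
  intro he
  exact h (char_eq_iff_toNat.mp he)

lemma contains_append_one (cs : List Char) (c x : Char) :
    (cs ++ [c]).contains x = (cs.contains x || (x == c)) := by
  simp only [List.contains_append, List.contains_cons, List.contains_nil, Bool.or_false]

lemma step_indOf (cs : List Char) (c : Char) :
    fStep (indOf cs) c = indOf (cs ++ [c]) := by
  by_cases hg : ('a' ≤ c ∧ c ≤ 'z') ∨ ('A' ≤ c ∧ c ≤ 'Z')
  · have hr := (guard_iff c).mp hg
    have hu := upperChar_toNat c hr
    set k : Nat := (PySem.Chars.upperChar c).toNat - 65 with hkdef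
    have hb : 65 ≤ (PySem.Chars.upperChar c).toNat ∧ (PySem.Chars.upperChar c).toNat ≤ 90 := by
      rw [hu]; split_ifs <;> omega
    have hklt : k < 26 := by omega
    have hcast : (((PySem.Chars.upperChar c).toNat : Int) - 65) = (k : Int) := by omega
    have hclass : c.toNat = 97 + k ∨ c.toNat = 65 + k := by
      rw [hu] at hkdef
      rcases hr with ⟨h1, h2⟩ | ⟨h1, h2⟩
      · left; rw [if_pos h1] at hkdef; omega
      · right; rw [if_neg (by omega)] at hkdef; omega
    have f65 : ∀ i, i < 26 → i ≠ k → (Char.ofNat (65 + i) == c) = false := by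
      intro i hi hne
      exact beq_char_false (by rw [toNat_ofNat_valid _ (by omega)]; omega)
    have f97 : ∀ i, i < 26 → i ≠ k → (Char.ofNat (97 + i) == c) = false := by
      intro i hi hne
      exact beq_char_false (by rw [toNat_ofNat_valid _ (by omega)]; omega)
    have hnewk : ((Char.ofNat (65 + k) == c) || (Char.ofNat (97 + k) == c)) = true := by
      rcases hclass with h | h
      · have : Char.ofNat (97 + k) = c :=
          char_eq_iff_toNat.mpr (by rw [toNat_ofNat_valid _ (by omega)]; omega)
        simp [this]
      · have : Char.ofNat (65 + k) = c :=
          char_eq_iff_toNat.mpr (by rw [toNat_ofNat_valid _ (by omega)]; omega)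
        simp [this]
    simp only [fStep, if_pos hg, hcast]
    have hget : PySem.List.pyGetD (indOf cs) (k : Int) 0 =
        (if cs.contains (Char.ofNat (65 + k)) || cs.contains (Char.ofNat (97 + k))
         then (1 : Int) else 0) := by
      rw [PySem.List.pyGetD_natCast, List.getD_eq_getElem?_getD,
        List.getElem?_eq_getElem (by rw [length_indOf]; exact hklt), getElem_indOf _ k hklt,
        Option.getD_some]
    rw [hget]
    by_cases hold : (cs.contains (Char.ofNat (65 + k)) || cs.contains (Char.ofNat (97 + k))) = true
    · rw [if_pos hold, if_neg (by decide)]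
      apply List.ext_getElem (by rw [length_indOf, length_indOf])
      intro i hi _
      rw [length_indOf] at hi
      rw [getElem_indOf _ i hi, getElem_indOf _ i hi, contains_append_one, contains_append_one]
      by_cases hik : i = k
      · subst hik
        rcases Bool.or_eq_true_iff.mp hold with h | h
        · simp [show Char.ofNat (65 + k) ∈ cs by simpa using h]
        · simp [show Char.ofNat (97 + k) ∈ cs by simpa using h]
      · rw [f65 i hi hik, f97 i hi hik, Bool.or_false, Bool.or_false]
    · rw [if_neg hold, if_pos (by decide), PySem.List.pySetD_natCast]
      apply List.ext_getElem (by rw [List.length_set, length_indOf, length_indOf])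
      intro i hi _
      have hi26 : i < 26 := by rw [List.length_set, length_indOf] at hi; exact hi
      rw [List.getElem_set, getElem_indOf (cs ++ [c]) i hi26, contains_append_one,
        contains_append_one]
      by_cases hik : k = i
      · subst hik
        rw [if_pos rfl]
        rcases Bool.or_eq_true_iff.mp hnewk with h | h
        · simp [show Char.ofNat (65 + k) = c by simpa using h]
        · simp [show Char.ofNat (97 + k) = c by simpa using h]
      · rw [if_neg hik, getElem_indOf _ i hi26,
          f65 i hi26 (fun h => hik h.symm), f97 i hi26 (fun h => hik h.symm),
          Bool.or_false, Bool.or_false]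
  · have hr : ¬ ((97 ≤ c.toNat ∧ c.toNat ≤ 122) ∨ (65 ≤ c.toNat ∧ c.toNat ≤ 90)) :=
      fun h => hg ((guard_iff c).mpr h)
    simp only [fStep, if_neg hg]
    apply List.ext_getElem (by rw [length_indOf, length_indOf])
    intro i hi _
    rw [length_indOf] at hi
    rw [getElem_indOf _ i hi, getElem_indOf _ i hi, contains_append_one, contains_append_one]
    rw [beq_char_false (a := Char.ofNat (65 + i)) (by rw [toNat_ofNat_valid _ (by omega)]; omega),
      beq_char_false (a := Char.ofNat (97 + i)) (by rw [toNat_ofNat_valid _ (by omega)]; omega),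
      Bool.or_false, Bool.or_false]

lemma fold_indOf (rest done : List Char) :
    rest.foldl fStep (indOf done) = indOf (done ++ rest) := by
  induction rest generalizing done with
  | nil => simp
  | cons c cs ih =>
    simp only [List.foldl_cons, step_indOf, ih]
    simp

-- ===== VERDICT (by name: the statement is the Claim_ definition above) =====
theorem f_spec : Claim_equal_f := by
  intro s _
  show f s = f_alt s
  have h0 : List.replicate 26 (0 : Int) = indOf [] := by decide
  rw [f, h0, fold_indOf]
  rfl
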